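-- pv_equiv track=rewrite | github.com/jaysonlarose/jlib | jlib/__init__.py | ascii_to_regional
-- ===== SOURCE A (Python) =====
-- def ascii_to_regional(s):
-- 	out = ""
-- 	for c in s:
-- 		if ord(c) >= ord("a") and ord(c) <= ord("z"):
-- 			out += chr(ord(c) - ord("a") + 0x1F1E6)
-- 		elif ord(c) >= ord("A") and ord(c) <= ord("Z"):
-- 			out += chr(ord(c) - ord("A") + 0x1F1E6)
-- 		else:
-- 			out += c
-- 	return out
-- ===== SOURCE B (Python) =====
-- def ascii_to_regional(s):
-- 	table = {}
-- 	for i in range(26):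
-- 		table[ord("a") + i] = chr(0x1F1E6 + i)
-- 		table[ord("A") + i] = chr(0x1F1E6 + i)
-- 	return s.translate(table)
-- ===== Notes on version B (the rewrite author's own statement) =====
-- stated objective: faster
-- what changed: B precomputes a 52-entry ordinal-to-regional-indicator translation table and does one str.translate call, instead of A's per-character branch-and-concatenate loop.
import Mathlib
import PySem

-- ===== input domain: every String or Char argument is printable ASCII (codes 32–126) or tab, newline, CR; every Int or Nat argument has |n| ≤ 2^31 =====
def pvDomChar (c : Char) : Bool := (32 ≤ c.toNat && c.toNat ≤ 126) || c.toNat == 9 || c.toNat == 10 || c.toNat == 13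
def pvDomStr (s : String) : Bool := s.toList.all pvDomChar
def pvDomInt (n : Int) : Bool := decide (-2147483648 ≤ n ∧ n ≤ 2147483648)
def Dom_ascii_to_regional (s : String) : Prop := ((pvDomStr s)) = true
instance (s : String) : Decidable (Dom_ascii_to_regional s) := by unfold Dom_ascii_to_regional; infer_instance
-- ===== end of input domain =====

-- B replaces A's per-character branch-and-concatenate loop with a precomputed
-- 52-entry ordinal-to-character translation table applied in one pass (idiomatic).


-- ===== PORT A =====
-- A: loop over the characters, appending the translated character (two range branches) to `out`.
def ascii_to_regional (s : String) : String :=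
  String.ofList (s.toList.foldl (fun out c =>
    if 97 ≤ c.toNat ∧ c.toNat ≤ 122 then out ++ [Char.ofNat (c.toNat - 97 + 0x1F1E6)]
    else if 65 ≤ c.toNat ∧ c.toNat ≤ 90 then out ++ [Char.ofNat (c.toNat - 65 + 0x1F1E6)]
    else out ++ [c]) [])

-- ===== PORT B =====
-- B: build the translation table (Python dict of ordinals), then translate = lookup-or-self per character.
def regionalTable : PySem.Dict Nat Char :=
  (PySem.List.pyRange 0 26 1).foldl (fun d i =>
    (d.insert (97 + i.toNat) (Char.ofNat (0x1F1E6 + i.toNat))).insert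
      (65 + i.toNat) (Char.ofNat (0x1F1E6 + i.toNat))) PySem.Dict.empty

def ascii_to_regional_alt (s : String) : String :=
  String.ofList (s.toList.map (fun c => regionalTable.getD c.toNat c))

-- ===== PRECONDITION & SPEC =====
def Spec_ascii_to_regional (s : String) (out : String) : Prop := out = ascii_to_regional_alt s
instance (s : String) (out : String) : Decidable (Spec_ascii_to_regional s out) := by unfold Spec_ascii_to_regional; infer_instance

-- ===== CLAIM (what is proved, stated in full; the proofs are below) =====
def Claim_equal_ascii_to_regional : Prop := ∀ (s : String), Dom_ascii_to_regional s → Spec_ascii_to_regional s (ascii_to_regional s)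

-- ===== LEMMAS AND PROOFS =====

-- the per-character translation A applies
def stepA (c : Char) : Char :=
  if 97 ≤ c.toNat ∧ c.toNat ≤ 122 then Char.ofNat (c.toNat - 97 + 0x1F1E6)
  else if 65 ≤ c.toNat ∧ c.toNat ≤ 90 then Char.ofNat (c.toNat - 65 + 0x1F1E6)
  else c

-- A's branch and B's table lookup agree, checked exhaustively over all domain
-- character codes (0..126 covers 9, 10, 13, 32..126); compared via toNat to keep
-- the kernel computation on Nat
set_option maxRecDepth 20000 in
lemma step_agree_codes :
    ((List.range 127).all fun n =>
      ((Char.ofNat n).toNat == n) &&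
      ((stepA (Char.ofNat n)).toNat == (regionalTable.getD n (Char.ofNat n)).toNat)) = true := by
  decide

lemma char_toNat_inj {a b : Char} (h : a.toNat = b.toNat) : a = b :=
  Char.ext (UInt32.toNat_inj.mp h)

lemma step_agree (c : Char) (h : pvDomChar c = true) :
    stepA c = regionalTable.getD c.toNat c := by
  have hlt : c.toNat < 127 := by
    simp only [pvDomChar, Bool.or_eq_true, Bool.and_eq_true, decide_eq_true_eq,
      beq_iff_eq] at h
    omega
  have hb := List.all_eq_true.mp step_agree_codes c.toNat (List.mem_range.mpr hlt)
  simp only [Bool.and_eq_true, beq_iff_eq] at hb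
  obtain ⟨h1, h2⟩ := hb
  have hc : Char.ofNat c.toNat = c := char_toNat_inj h1
  rw [hc] at h2
  exact char_toNat_inj h2

-- A's append-to-out loop is the map of stepA
lemma foldA_eq_map (l : List Char) (acc : List Char) :
    l.foldl (fun out c =>
      if 97 ≤ c.toNat ∧ c.toNat ≤ 122 then out ++ [Char.ofNat (c.toNat - 97 + 0x1F1E6)]
      else if 65 ≤ c.toNat ∧ c.toNat ≤ 90 then out ++ [Char.ofNat (c.toNat - 65 + 0x1F1E6)]
      else out ++ [c]) acc = acc ++ l.map stepA := by
  induction l generalizing acc with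
  | nil => simp
  | cons c t ih =>
    have hstep :
        (if 97 ≤ c.toNat ∧ c.toNat ≤ 122 then acc ++ [Char.ofNat (c.toNat - 97 + 0x1F1E6)]
        else if 65 ≤ c.toNat ∧ c.toNat ≤ 90 then acc ++ [Char.ofNat (c.toNat - 65 + 0x1F1E6)]
        else acc ++ [c]) = acc ++ [stepA c] := by
      unfold stepA; split_ifs <;> rfl
    simp only [List.foldl_cons, List.map_cons, hstep, ih]
    simp

-- ===== VERDICT (by name: the statement is the Claim_ definition above) =====
set_option maxRecDepth 8000 in
theorem ascii_to_regional_spec : Claim_equal_ascii_to_regional := by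
  intro s hDom
  unfold Spec_ascii_to_regional ascii_to_regional ascii_to_regional_alt
  rw [foldA_eq_map, List.nil_append]
  congr 1
  apply List.map_congr_left
  intro c hc
  exact step_agree c (List.all_eq_true.mp hDom c hc)
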